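-- pv_equiv track=rewrite | github.com/Drkchy/RL | Project_2048/agent.py | force_edge
-- ===== SOURCE A (Python) =====
-- def force_edge(state):
--     count_edge = 0
--     sum_edge = 0
--     for x_y in state:
--         if state[x_y]!=0:
--             if ((x_y[0] == 0) or (x_y[0] == 3)) and ((x_y[1] == 0) or (x_y[1] == 3)) :
--                 count_edge +=1
--                 sum_edge += state[x_y]
--     return count_edge, sum_edge
-- ===== SOURCE B (Python) =====
-- def force_edge(state):
--     corners = [(0, 0), (0, 3), (3, 0), (3, 3)]
--     count_edge = 0
--     sum_edge = 0
--     for c in corners: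
--         v = state.get(c, 0)
--         if v != 0:
--             count_edge += 1
--             sum_edge += v
--     return count_edge, sum_edge
-- ===== Notes on version B (the rewrite author's own statement) =====
-- stated objective: simpler
-- what changed: Instead of scanning every key of the grid dict with a corner-test branch, B looks up only the four fixed corner keys with state.get(corner, 0) and accumulates count and sum from those lookups.
import Mathlib
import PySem

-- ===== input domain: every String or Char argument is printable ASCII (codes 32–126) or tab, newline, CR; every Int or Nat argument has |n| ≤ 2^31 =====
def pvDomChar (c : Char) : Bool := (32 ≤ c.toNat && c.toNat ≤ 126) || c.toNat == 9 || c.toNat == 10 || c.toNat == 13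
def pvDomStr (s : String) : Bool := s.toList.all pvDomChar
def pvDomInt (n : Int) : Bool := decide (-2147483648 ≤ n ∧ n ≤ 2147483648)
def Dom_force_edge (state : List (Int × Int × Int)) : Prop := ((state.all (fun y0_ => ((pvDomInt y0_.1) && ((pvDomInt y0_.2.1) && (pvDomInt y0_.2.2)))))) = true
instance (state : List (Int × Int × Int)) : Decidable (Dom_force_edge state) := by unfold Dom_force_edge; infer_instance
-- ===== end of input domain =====

-- B looks up only the four fixed corner keys instead of scanning every key of the dict (objective: simpler).
-- The dict[(x,y),int] argument arrives as a flat triple list; both ports rebuild the dict as Python does.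

-- ===== PORT A =====
def force_edge (state : List (Int × Int × Int)) : Int × Int :=
  let d : PySem.Dict (Int × Int) Int :=
    PySem.Dict.ofList (state.map (fun t => ((t.1, t.2.1), t.2.2)))
  -- for x_y in state: if state[x_y] != 0: if corner: count += 1; sum += state[x_y]
  d.items.foldl
    (fun acc kv =>
      if kv.2 ≠ 0 then
        if (kv.1.1 = 0 ∨ kv.1.1 = 3) ∧ (kv.1.2 = 0 ∨ kv.1.2 = 3) then
          (acc.1 + 1, acc.2 + kv.2)
        else acc
      else acc)
    (0, 0)

-- ===== PORT B =====
def force_edge_alt (state : List (Int × Int × Int)) : Int × Int :=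
  let d : PySem.Dict (Int × Int) Int :=
    PySem.Dict.ofList (state.map (fun t => ((t.1, t.2.1), t.2.2)))
  -- for c in corners: v = state.get(c, 0); if v != 0: count += 1; sum += v
  ([((0 : Int), (0 : Int)), (0, 3), (3, 0), (3, 3)]).foldl
    (fun acc c =>
      let v := d.getD c 0
      if v ≠ 0 then (acc.1 + 1, acc.2 + v) else acc)
    (0, 0)

-- ===== PRECONDITION & SPEC =====
def Spec_force_edge (state : List (Int × Int × Int)) (out : Int × Int) : Prop := out = force_edge_alt state
instance (state : List (Int × Int × Int)) (out : Int × Int) : Decidable (Spec_force_edge state out) := by unfold Spec_force_edge; infer_instance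

-- ===== CLAIM (what is proved, stated in full; the proofs are below) =====
def Claim_equal_force_edge : Prop := ∀ (state : List (Int × Int × Int)), Dom_force_edge state → Spec_force_edge state (force_edge state)

-- ===== LEMMAS AND PROOFS =====

-- lookup with default 0 in the association list l read as a dict
def pvLk (l : List ((Int × Int) × Int)) (c : Int × Int) : Int :=
  (PySem.Dict.mk l).getD c 0

def pvInd (v : Int) : Int := if v ≠ 0 then 1 else 0

def pvStepA (acc : Int × Int) (kv : (Int × Int) × Int) : Int × Int :=
  if kv.2 ≠ 0 then
    if (kv.1.1 = 0 ∨ kv.1.1 = 3) ∧ (kv.1.2 = 0 ∨ kv.1.2 = 3) then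
      (acc.1 + 1, acc.2 + kv.2)
    else acc
  else acc

lemma pvLk_cons (k : Int × Int) (v : Int) (rest : List ((Int × Int) × Int)) (c : Int × Int) :
    pvLk ((k, v) :: rest) c = if k = c then v else pvLk rest c := by
  simp only [pvLk, PySem.Dict.getD, PySem.Dict.get?_mk_cons, beq_iff_eq]
  split <;> rfl

lemma pvLk_absent (l : List ((Int × Int) × Int)) (c : Int × Int)
    (h : c ∉ l.map Prod.fst) : pvLk l c = 0 := by
  induction l with
  | nil => rfl
  | cons kv rest ih =>
    obtain ⟨k, v⟩ := kv
    simp only [List.map_cons, List.mem_cons, not_or] at h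
    rw [pvLk_cons, if_neg (fun hc => h.1 hc.symm)]
    exact ih h.2

lemma pvShiftA (l : List ((Int × Int) × Int)) (acc : Int × Int) :
    l.foldl pvStepA acc
      = (acc.1 + (l.foldl pvStepA (0, 0)).1, acc.2 + (l.foldl pvStepA (0, 0)).2) := by
  induction l generalizing acc with
  | nil => simp
  | cons kv rest ih =>
    simp only [List.foldl_cons]
    rw [ih (pvStepA acc kv), ih (pvStepA (0, 0) kv)]
    simp only [pvStepA]
    split_ifs <;> refine Prod.ext ?_ ?_ <;> simp <;> ring

lemma pvAclosed (l : List ((Int × Int) × Int)) (h : (l.map Prod.fst).Nodup) :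
    l.foldl pvStepA (0, 0)
      = (pvInd (pvLk l (0, 0)) + pvInd (pvLk l (0, 3)) + pvInd (pvLk l (3, 0)) + pvInd (pvLk l (3, 3)),
         pvLk l (0, 0) + pvLk l (0, 3) + pvLk l (3, 0) + pvLk l (3, 3)) := by
  induction l with
  | nil =>
    have h0 : ∀ c, pvLk ([] : List ((Int × Int) × Int)) c = 0 := fun c => rfl
    simp [h0, pvInd]
  | cons kv rest ih =>
    obtain ⟨k, v⟩ := kv
    simp only [List.map_cons, List.nodup_cons] at h
    obtain ⟨hk, hrest⟩ := h
    simp only [List.foldl_cons]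
    rw [pvShiftA, ih hrest, pvLk_cons, pvLk_cons, pvLk_cons, pvLk_cons]
    by_cases h00 : k = (0, 0)
    · have h0 : pvLk rest (0, 0) = 0 := pvLk_absent _ _ (h00 ▸ hk)
      subst h00
      rw [if_pos rfl, if_neg (by decide), if_neg (by decide), if_neg (by decide), h0]
      simp only [pvStepA, pvInd]
      split_ifs <;> simp_all <;> ring
    · by_cases h03 : k = (0, 3)
      · have h0 : pvLk rest (0, 3) = 0 := pvLk_absent _ _ (h03 ▸ hk)
        subst h03
        rw [if_neg (by decide), if_pos rfl, if_neg (by decide), if_neg (by decide), h0]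
        simp only [pvStepA, pvInd]
        split_ifs <;> simp_all <;> ring
      · by_cases h30 : k = (3, 0)
        · have h0 : pvLk rest (3, 0) = 0 := pvLk_absent _ _ (h30 ▸ hk)
          subst h30
          rw [if_neg (by decide), if_neg (by decide), if_pos rfl, if_neg (by decide), h0]
          simp only [pvStepA, pvInd]
          split_ifs <;> simp_all <;> ring
        · by_cases h33 : k = (3, 3)
          · have h0 : pvLk rest (3, 3) = 0 := pvLk_absent _ _ (h33 ▸ hk)
            subst h33
            clear h00 h03 h30
            rw [if_neg (by decide), if_neg (by decide), if_neg (by decide), if_pos rfl, h0]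
            simp only [pvStepA, pvInd]
            split_ifs <;> simp_all <;> ring
          · have hnc : ¬ ((k.1 = 0 ∨ k.1 = 3) ∧ (k.2 = 0 ∨ k.2 = 3)) := by
              rintro ⟨h1 | h1, h2 | h2⟩ <;>
                [exact h00 (Prod.ext h1 h2); exact h03 (Prod.ext h1 h2);
                 exact h30 (Prod.ext h1 h2); exact h33 (Prod.ext h1 h2)]
            rw [if_neg h00, if_neg h03, if_neg h30, if_neg h33]
            simp only [pvStepA, if_neg hnc]
            split_ifs <;> simp

lemma pvBclosed (d : PySem.Dict (Int × Int) Int) :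
    ([((0 : Int), (0 : Int)), (0, 3), (3, 0), (3, 3)]).foldl
        (fun acc c => let v := d.getD c 0; if v ≠ 0 then (acc.1 + 1, acc.2 + v) else acc)
        (0, 0)
      = (pvInd (d.getD (0, 0) 0) + pvInd (d.getD (0, 3) 0) + pvInd (d.getD (3, 0) 0) + pvInd (d.getD (3, 3) 0),
         d.getD (0, 0) 0 + d.getD (0, 3) 0 + d.getD (3, 0) 0 + d.getD (3, 3) 0) := by
  simp only [List.foldl, pvInd]
  split_ifs <;> simp_all

-- ===== VERDICT (by name: the statement is the Claim_ definition above) =====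
theorem force_edge_spec : Claim_equal_force_edge := by
  intro state _
  unfold Spec_force_edge force_edge force_edge_alt
  set d : PySem.Dict (Int × Int) Int :=
    PySem.Dict.ofList (state.map (fun t => ((t.1, t.2.1), t.2.2))) with hd
  have hnd : (d.items.map Prod.fst).Nodup := PySem.Dict.nodup_keys_ofList _
  have hlk : ∀ c, pvLk d.items c = d.getD c 0 := fun c => rfl
  have hA := pvAclosed d.items hnd
  simp only [hlk] at hA
  rw [show (d.items.foldl
      (fun acc kv =>
        if kv.2 ≠ 0 then
          if (kv.1.1 = 0 ∨ kv.1.1 = 3) ∧ (kv.1.2 = 0 ∨ kv.1.2 = 3) then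
            (acc.1 + 1, acc.2 + kv.2)
          else acc
        else acc)
      ((0 : Int), (0 : Int)))
      = d.items.foldl pvStepA (0, 0) from rfl]
  rw [hA, pvBclosed]
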